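-- pv_equiv track=rewrite | github.com/Linus-MK/AtCoder | company_competition/exawizards2019_d.py | get_residue_sum
-- ===== SOURCE A (Python) =====
-- import math
-- import copy
--
-- modu = 1000000007
--
-- def get_residue_sum(a, li, length):
-- 	if a < min(li):
-- 		# 残り全部n
-- 		return a * math.factorial(length)
-- 	elif length == 1:
-- 		return a % li[0]
-- 	else:
-- 		summ = 0
-- 		for idx in range(length):
-- #			li から iを削除して
-- 			li2 = copy.deepcopy(li)
-- 			q = li2.pop(idx)
-- 			summ += get_residue_sum(a%q, li2, length-1)
-- 		return (summ % modu)
-- ===== SOURCE B (Python) =====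
-- import math
--
-- modu = 1000000007
--
-- def get_residue_sum(a, li, length):
--     # DP: memoized recursion on the state (a, remaining-tuple, n); each distinct
--     # sub-state is computed once instead of once per permutation branch.
--     memo = {}
--     def f(a, li, n):
--         if a < min(li):
--             return a * math.factorial(n)
--         if n == 1:
--             return a % li[0]
--         key = (a, li, n)
--         v = memo.get(key)
--         if v is None:
--             v = sum(f(a % li[i], li[:i] + li[i+1:], n - 1) for i in range(n)) % modu
--             memo[key] = v
--         return v
--     return f(a, tuple(li), length)
-- ===== Notes on version B (the rewrite author's own statement) =====
-- stated objective: faster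
-- what changed: A recurses naively over every branch of the permutation tree (deepcopy + pop per call); B memoizes the recursion on states (a, remaining tuple, n) in a dict, computing each distinct sub-state once.
import Mathlib
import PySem

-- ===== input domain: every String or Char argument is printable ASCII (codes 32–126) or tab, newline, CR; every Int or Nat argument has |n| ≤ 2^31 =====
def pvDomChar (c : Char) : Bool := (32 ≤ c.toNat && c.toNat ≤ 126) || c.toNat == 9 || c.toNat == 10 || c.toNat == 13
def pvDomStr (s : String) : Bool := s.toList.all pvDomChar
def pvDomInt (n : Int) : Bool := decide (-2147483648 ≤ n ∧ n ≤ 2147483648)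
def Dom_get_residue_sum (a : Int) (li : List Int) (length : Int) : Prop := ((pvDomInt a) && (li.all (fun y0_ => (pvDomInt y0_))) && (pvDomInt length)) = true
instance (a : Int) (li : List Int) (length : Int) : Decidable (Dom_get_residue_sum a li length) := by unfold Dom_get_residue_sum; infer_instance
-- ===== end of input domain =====

-- B replaces A's factorial-time recursion (deepcopy + pop over every branch of the
-- permutation tree) by a memoized recursion (DP) on the states (a, remaining tuple, n).

-- ===== PORT A =====
-- math.factorial(n): exact for 0 ≤ n (math.factorial raises ValueError on n < 0, outside Pre_)
def pyFactorial (n : Int) : Int := (Nat.factorial n.toNat : Int)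

def get_residue_sum (a : Int) (li : List Int) (length : Int) : Int :=
  match PySem.List.min? li (fun x => x) with
  | none => 0
  | some m =>
    if a < m then a * pyFactorial length
    else if length = 1 then PySem.Int.mod a (PySem.List.pyGetD li 0 0)
    else
      PySem.Int.mod
        ((PySem.List.pyRange 0 length 1).foldl (fun summ idx =>
          match h : PySem.List.pop? li idx with
          | none => summ
          | some qli2 => summ + get_residue_sum (PySem.Int.mod a qli2.1) qli2.2 (length - 1)) 0)
        1000000007
termination_by li.length
decreasing_by
  have := PySem.List.length_of_pop?_eq_some (h := h)
  omega


-- ===== PORT B =====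
-- the inner memoized f(a, li, n) of Source B: returns (value, updated memo)
def pvF (a : Int) (li : List Int) (n : Int)
    (memo : PySem.Dict (Int × List Int × Int) Int) :
    Int × PySem.Dict (Int × List Int × Int) Int :=
  match PySem.List.min? li (fun x => x) with
  | none => (0, memo)   -- min([]) raises in Python; unreachable under Pre_
  | some m =>
    if a < m then (a * pyFactorial n, memo)
    else if h1 : n = 1 then (PySem.Int.mod a (PySem.List.pyGetD li 0 0), memo)
    else
      match memo.get? (a, li, n) with
      | some v => (v, memo)
      | none =>
        let p := (PySem.List.pyRange 0 n 1).attach.foldl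
          (fun (p : Int × PySem.Dict (Int × List Int × Int) Int) i =>
            let r := pvF (PySem.Int.mod a (PySem.List.pyGetD li i.1 0))
              (PySem.List.slice li none (some i.1) ++ PySem.List.slice li (some (i.1 + 1)) none)
              (n - 1) p.2
            (p.1 + r.1, r.2)) (0, memo)
        let v := PySem.Int.mod p.1 1000000007
        (v, p.2.insert (a, li, n) v)
termination_by n.toNat
decreasing_by
  have hi := PySem.List.mem_pyRange_one.mp i.2
  omega

def get_residue_sum_alt (a : Int) (li : List Int) (length : Int) : Int :=
  (pvF a li length PySem.Dict.empty).1


-- ===== PRECONDITION & SPEC =====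
-- Pre_ admits exactly the inputs on which Python A returns: a nonempty list, no zero among
-- the first `length` elements unless every element exceeds a (else a%0 raises
-- ZeroDivisionError), length ≤ len(li) unless every element exceeds a (else li2.pop(idx)
-- raises IndexError), and 0 ≤ length unless some element is ≤ a (else math.factorial raises).
def Pre_get_residue_sum (a : Int) (li : List Int) (length : Int) : Prop :=
  li ≠ [] ∧ ((0 : Int) ∈ li.take length.toNat → ∀ x ∈ li, a < x) ∧
  (length ≤ (li.length : Int) ∨ ∀ x ∈ li, a < x) ∧
  (0 ≤ length ∨ ¬ ∀ x ∈ li, a < x)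

instance (a : Int) (li : List Int) (length : Int) : Decidable (Pre_get_residue_sum a li length) := by
  unfold Pre_get_residue_sum; infer_instance

def pvWitness_get_residue_sum : Int × List Int × Int := (7, [3, 2], 2)

def Spec_get_residue_sum (a : Int) (li : List Int) (length : Int) (out : Int) : Prop := out = get_residue_sum_alt a li length
instance (a : Int) (li : List Int) (length : Int) (out : Int) : Decidable (Spec_get_residue_sum a li length out) := by unfold Spec_get_residue_sum; infer_instance

-- ===== CLAIM (what is proved, stated in full; the proofs are below) =====
def Claim_equal_get_residue_sum : Prop := ∀ (a : Int) (li : List Int) (length : Int), Dom_get_residue_sum a li length → Pre_get_residue_sum a li length → Spec_get_residue_sum a li length (get_residue_sum a li length)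

-- ===== LEMMAS AND PROOFS =====

-- a < min(li)  ↔  every element exceeds a
lemma pvLtMinIff {li : List Int} {m a : Int}
    (hm : PySem.List.min? li (fun x => x) = some m) :
    a < m ↔ ∀ x ∈ li, a < x := by
  constructor
  · intro h x hx
    exact lt_of_lt_of_le h (PySem.List.min?_isMin hm x hx)
  · intro h
    exact h m (PySem.List.min?_mem hm)

lemma A_unfold_loop (a : Int) (li : List Int) (n : Int) {m : Int}
    (hm : PySem.List.min? li (fun x => x) = some m) (hma : ¬ a < m) (h2 : ¬ n = 1)
    (hlen : n ≤ (li.length : Int)) :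
    get_residue_sum a li n =
    PySem.Int.mod
      (((List.range n.toNat).map (fun k =>
        get_residue_sum (PySem.Int.mod a (li.getD k 0)) (li.eraseIdx k) (n - 1))).sum)
      1000000007 := by
  rw [get_residue_sum, hm]
  dsimp only
  rw [if_neg hma, if_neg h2]
  congr 1
  rw [PySem.List.pyRange_one]
  simp only [Int.sub_zero]
  rw [List.foldl_map]
  rw [PySem.List.foldl_congr_mem _ _
    (fun s k => s + get_residue_sum (PySem.Int.mod a (li.getD k 0)) (li.eraseIdx k) (n - 1)) 0 ?_]
  · rw [PySem.List.foldl_add]; simp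
  · intro acc k hk
    have hk' : k < n.toNat := List.mem_range.mp hk
    have hkl : k < li.length := by omega
    have hp : PySem.List.pop? li (0 + (k : Int)) = some (li[k], li.eraseIdx k) := by
      rw [show (0 : Int) + (k : Int) = (k : Int) by ring, PySem.List.pop?_natCast li k hkl]
    split
    · rename_i heq
      rw [hp] at heq; cases heq
    · rename_i qli2 heq
      rw [hp] at heq
      injection heq with h
      subst h
      simp [List.getElem?_eq_getElem hkl]

-- the child states of the loop stay inside Pre_
lemma pre_child {a : Int} {li : List Int} {n : Int} {m : Int}
    (hm : PySem.List.min? li (fun x => x) = some m) (hma : ¬ a < m)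
    (h2 : ¬ n = 1) (hpre : Pre_get_residue_sum a li n) {k : Nat} (hk : k < n.toNat) :
    Pre_get_residue_sum (PySem.Int.mod a (li.getD k 0)) (li.eraseIdx k) (n - 1) := by
  obtain ⟨hne, hzero, hd3, hd4⟩ := hpre
  have hall : ¬ ∀ x ∈ li, a < x := fun h => hma ((pvLtMinIff hm).mpr h)
  have hlen : n ≤ (li.length : Int) := hd3.resolve_right hall
  have hn2 : 2 ≤ n := by omega
  have hkl : k < li.length := by omega
  refine ⟨?_, ?_, ?_, ?_⟩
  · apply List.ne_nil_of_length_pos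
    rw [List.length_eraseIdx, if_pos hkl]
    omega
  · -- the first (n-1) positions of the erased list carry no zero
    intro h0
    exfalso
    rw [List.mem_take_iff_getElem] at h0
    obtain ⟨j, hj, hj0⟩ := h0
    rw [List.getElem_eraseIdx] at hj0
    have hzero' : (0 : Int) ∉ li.take n.toNat := fun hz => hall (hzero hz)
    apply hzero'
    rw [List.mem_take_iff_getElem]
    have hjl : j < (li.eraseIdx k).length := by omega
    have hle : (li.eraseIdx k).length = li.length - 1 := by
      rw [List.length_eraseIdx, if_pos hkl]
    split at hj0
    · exact ⟨j, by omega, hj0⟩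
    · exact ⟨j + 1, by omega, hj0⟩
  · left
    rw [List.length_eraseIdx, if_pos hkl]
    omega
  · left
    omega

def MemoInv (memo : PySem.Dict (Int × List Int × Int) Int) : Prop :=
  ∀ a li n v, memo.get? (a, li, n) = some v → v = get_residue_sum a li n

lemma pvF_correct : ∀ (K : Nat) (a : Int) (li : List Int) (n : Int)
    (memo : PySem.Dict (Int × List Int × Int) Int),
    n.toNat = K → Pre_get_residue_sum a li n → MemoInv memo →
    (pvF a li n memo).1 = get_residue_sum a li n ∧ MemoInv (pvF a li n memo).2 := by
  intro K
  induction K using Nat.strong_induction_on with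
  | _ K IH =>
  intro a li n memo hK hpre hinv
  obtain ⟨hne, hzero, hd3, hd4⟩ := hpre
  cases hm0 : PySem.List.min? li (fun x => x) with
  | none => exact absurd ((PySem.List.min?_eq_none_iff _ _).mp hm0) hne
  | some m =>
  rw [pvF, get_residue_sum, hm0]
  dsimp only
  by_cases h1 : a < m
  · rw [if_pos h1, if_pos h1]
    exact ⟨rfl, hinv⟩
  · rw [if_neg h1, if_neg h1]
    by_cases h2 : n = 1
    · rw [dif_pos h2, if_pos h2]
      exact ⟨rfl, hinv⟩
    · rw [dif_neg h2, if_neg h2]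
      have hall : ¬ ∀ x ∈ li, a < x := fun h => h1 ((pvLtMinIff hm0).mpr h)
      have hlen : n ≤ (li.length : Int) := hd3.resolve_right hall
      have hA0 := A_unfold_loop a li n hm0 h1 h2 hlen
      have hA := hA0
      rw [get_residue_sum, hm0] at hA
      dsimp only at hA
      rw [if_neg h1, if_neg h2] at hA
      cases hget : memo.get? (a, li, n) with
      | some v =>
        dsimp only
        have hv := hinv _ _ _ _ hget
        rw [get_residue_sum, hm0] at hv
        dsimp only at hv
        rw [if_neg h1, if_neg h2] at hv
        exact ⟨hv, hinv⟩
      | none =>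
        dsimp only
        have hfold : ∀ (l : List {x : Int // x ∈ PySem.List.pyRange 0 n 1}), ∀ (s0 : Int)
            (m0 : PySem.Dict (Int × List Int × Int) Int), MemoInv m0 →
            ((l.foldl (fun (p : Int × PySem.Dict (Int × List Int × Int) Int) i =>
              (p.1 + (pvF (PySem.Int.mod a (PySem.List.pyGetD li i.1 0))
                (PySem.List.slice li none (some i.1) ++ PySem.List.slice li (some (i.1 + 1)) none)
                (n - 1) p.2).1,
               (pvF (PySem.Int.mod a (PySem.List.pyGetD li i.1 0))
                (PySem.List.slice li none (some i.1) ++ PySem.List.slice li (some (i.1 + 1)) none)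
                (n - 1) p.2).2)) (s0, m0)).1
              = s0 + (l.map (fun i => get_residue_sum (PySem.Int.mod a (li.getD i.1.toNat 0))
                  (li.eraseIdx i.1.toNat) (n - 1))).sum)
            ∧ MemoInv ((l.foldl (fun (p : Int × PySem.Dict (Int × List Int × Int) Int) i =>
              (p.1 + (pvF (PySem.Int.mod a (PySem.List.pyGetD li i.1 0))
                (PySem.List.slice li none (some i.1) ++ PySem.List.slice li (some (i.1 + 1)) none)
                (n - 1) p.2).1,
               (pvF (PySem.Int.mod a (PySem.List.pyGetD li i.1 0))
                (PySem.List.slice li none (some i.1) ++ PySem.List.slice li (some (i.1 + 1)) none)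
                (n - 1) p.2).2)) (s0, m0)).2) := by
          intro l
          induction l with
          | nil => intro s0 m0 h0; simpa using h0
          | cons i t iht =>
            intro s0 m0 h0
            obtain ⟨hi0, hin⟩ := PySem.List.mem_pyRange_one.mp i.2
            have hieq : PySem.List.slice li none (some i.1) ++ PySem.List.slice li (some (i.1 + 1)) none
                = li.eraseIdx i.1.toNat := by
              rw [PySem.List.slice_to li hi0, PySem.List.slice_from li (by omega : (0:Int) ≤ i.1 + 1),
                List.eraseIdx_eq_take_drop_succ]
              congr 1
              congr 1
              omega
            have hD : PySem.List.pyGetD li i.1 0 = li.getD i.1.toNat 0 := by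
              rw [show i.1 = ((i.1.toNat : Nat) : Int) by omega, PySem.List.pyGetD_natCast,
                Int.toNat_natCast]
            have hchild := pre_child hm0 h1 h2 ⟨hne, hzero, hd3, hd4⟩
              (k := i.1.toNat) (by omega)
            have hrec := IH (n - 1).toNat (by omega) (PySem.Int.mod a (li.getD i.1.toNat 0))
              (li.eraseIdx i.1.toNat) (n - 1) m0 rfl hchild h0
            simp only [List.foldl_cons, List.map_cons, List.sum_cons]
            rw [hD, hieq]
            have hstep := iht
              (s0 + (pvF (PySem.Int.mod a (li.getD i.1.toNat 0)) (li.eraseIdx i.1.toNat) (n - 1) m0).1)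
              ((pvF (PySem.Int.mod a (li.getD i.1.toNat 0)) (li.eraseIdx i.1.toNat) (n - 1) m0).2) hrec.2
            refine ⟨?_, hstep.2⟩
            rw [hstep.1, hrec.1]
            ring
        have hmain := hfold (PySem.List.pyRange 0 n 1).attach 0 memo hinv
        rw [List.attach_map_val (l := PySem.List.pyRange 0 n 1)
          (f := fun j : Int => get_residue_sum (PySem.Int.mod a (li.getD j.toNat 0))
            (li.eraseIdx j.toNat) (n - 1))] at hmain
        have hsums : ((PySem.List.pyRange 0 n 1).map (fun i =>
              get_residue_sum (PySem.Int.mod a (li.getD i.toNat 0)) (li.eraseIdx i.toNat) (n - 1)))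
            = ((List.range n.toNat).map (fun k =>
              get_residue_sum (PySem.Int.mod a (li.getD k 0)) (li.eraseIdx k) (n - 1))) := by
          rw [PySem.List.pyRange_one]
          simp only [Int.sub_zero]
          rw [List.map_map]
          apply List.map_congr_left
          intro k _
          simp only [Function.comp]
          have e : ((0 : Int) + (k : Nat)).toNat = k := by omega
          rw [e]
        constructor
        · rw [hA]
          congr 1
          rw [hmain.1, hsums, zero_add]
        · intro a' li' n' v' hlook
          rw [PySem.Dict.get?_insert] at hlook
          by_cases hk : ((a', li', n') : Int × List Int × Int) = (a, li, n)
          · rw [if_pos hk] at hlook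
            injection hlook with hv
            have ha' : a' = a := congrArg Prod.fst hk
            have hl' : li' = li := congrArg (fun p => p.2.1) hk
            have hn' : n' = n := congrArg (fun p => p.2.2) hk
            subst ha' hl' hn'
            rw [← hv, hA0, hmain.1, hsums, zero_add]
          · rw [if_neg hk] at hlook
            exact hmain.2 _ _ _ _ hlook

-- ===== VERDICT (by name: the statement is the Claim_ definition above) =====
theorem get_residue_sum_spec : Claim_equal_get_residue_sum := by
  intro a li length _ hpre
  unfold Spec_get_residue_sum get_residue_sum_alt
  exact (pvF_correct length.toNat a li length PySem.Dict.empty rfl hpre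
    (by intro a' li' n' v' hv; simp [PySem.Dict.get?_empty] at hv)).1.symm
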